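-- pv_equiv track=rewrite | github.com/fluxnet/ONEFlux | oneflux/downscaling/functions.py | time_zone
-- ===== SOURCE A (Python) =====
-- def time_zone(gmt, lon):
--    #---
--    #--- Convert longitude index to longtitude in degrees
--    deg = lon
--    #---
--    #--- Determine into which time zone (15 degree interval) the
--    #--- longitude falls.
--    i=0
--    while i in range(25):
--       if (deg < (-187.5+(15*(i+1)))):
--          zone = (i+1)
--          if (zone == 25):
--             zone = 1
--          i=24
--       i=i+1
--    #---
--    #--- Calculate change (in number of hours) from GMT time to
--    #--- local hour.  Change will be negative for zones < 13 and
--    #--- positive for zones > 13.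
--    #---
--    #--- There is also a correction for lhour < 0 and lhour > 23
--    #--- to lhour between 0 and 23.
--    if (zone < 13):
--       change = zone-13
--       lhour = gmt+change
--    #---
--    if (zone == 13):
--       lhour = gmt
--    #---
--    if (zone > 13):
--       change = zone-13
--       lhour = gmt+change
--    if (lhour <  0):
--       lhour = lhour+24
--    if (lhour >= 24):
--       lhour = lhour-24
--    return zone,lhour
-- ===== SOURCE B (Python) =====
-- def time_zone(gmt, lon):
--     # closed-form zone: smallest j in 1..24 with lon < -187.5 + 15*j,
--     # i.e. j = floor((2*lon + 375) / 30) + 1, clamped below to 1;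
--     # the boundary zone 25 wraps to 1.
--     zone = max(1, (2 * lon + 375) // 30 + 1)
--     if zone == 25:
--         zone = 1
--     lhour = gmt + zone - 13
--     if lhour < 0:
--         lhour += 24
--     if lhour >= 24:
--         lhour -= 24
--     return zone, lhour
-- ===== Notes on version B (the rewrite author's own statement) =====
-- stated objective: simpler
-- what changed: Replaces the 25-iteration while-loop search for the time zone with a closed-form floor-division formula (clamped below to 1), and collapses the three-way zone<13/==13/>13 conditional into the single expression gmt+zone-13.
import Mathlib
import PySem

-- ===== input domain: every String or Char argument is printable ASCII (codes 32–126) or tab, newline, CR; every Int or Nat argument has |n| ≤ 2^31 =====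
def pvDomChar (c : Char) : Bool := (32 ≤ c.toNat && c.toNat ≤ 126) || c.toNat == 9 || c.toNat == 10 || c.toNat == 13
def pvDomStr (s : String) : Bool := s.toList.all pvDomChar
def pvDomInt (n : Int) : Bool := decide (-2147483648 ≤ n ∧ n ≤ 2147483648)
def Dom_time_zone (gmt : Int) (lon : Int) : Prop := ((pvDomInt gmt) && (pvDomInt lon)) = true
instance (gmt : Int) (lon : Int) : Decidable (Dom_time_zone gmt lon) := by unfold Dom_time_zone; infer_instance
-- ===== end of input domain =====

-- B replaces A's 25-step zone-search loop by a closed-form floor-division formula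
-- and collapses the three-way lhour conditional into one expression (objective: simpler).


-- ===== PORT A =====
-- the while loop: i runs 0,1,…; once the test fires zone is set and i jumps to 25.
-- Python compares the int deg with the float -187.5+15*(i+1); for integer deg this is
-- exactly the integer comparison 2*deg < 30*(i+1) - 375 (ported exactly so).
-- 'none' = zone never assigned (Python UnboundLocalError), excluded by Pre_.
def tzLoop (deg : Int) : Nat → Int → Option Int
  | 0, _ => none
  | fuel + 1, i =>
    if 2 * deg < 30 * (i + 1) - 375 then
      some (if i + 1 == 25 then 1 else i + 1)
    else tzLoop deg fuel (i + 1)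

def time_zone (gmt : Int) (lon : Int) : Int × Int :=
  let deg := lon
  match tzLoop deg 25 0 with
  | none => (0, 0)  -- Python raises UnboundLocalError here; outside Pre_time_zone
  | some zone =>
    let lhour :=
      if zone < 13 then gmt + (zone - 13)
      else if zone == 13 then gmt
      else gmt + (zone - 13)
    let lhour := if lhour < 0 then lhour + 24 else lhour
    let lhour := if lhour ≥ 24 then lhour - 24 else lhour
    (zone, lhour)

-- ===== PORT B =====
def time_zone_alt (gmt : Int) (lon : Int) : Int × Int :=
  let z := max 1 (PySem.Int.floordiv (2 * lon + 375) 30 + 1)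
  let zone := if z == 25 then 1 else z
  let lhour := gmt + zone - 13
  let lhour := if lhour < 0 then lhour + 24 else lhour
  let lhour := if lhour ≥ 24 then lhour - 24 else lhour
  (zone, lhour)

-- ===== PRECONDITION & SPEC =====
-- Pre_ excludes exactly the inputs where A raises UnboundLocalError: for lon ≥ 188
-- (i.e. lon ≥ 187.5) the loop never assigns zone.
def Pre_time_zone (gmt : Int) (lon : Int) : Prop := lon ≤ 187
instance (gmt : Int) (lon : Int) : Decidable (Pre_time_zone gmt lon) := by unfold Pre_time_zone; infer_instance
def pvWitness_time_zone : Int × Int := (7, -100)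

def Spec_time_zone (gmt : Int) (lon : Int) (out : Int × Int) : Prop := out = time_zone_alt gmt lon
instance (gmt : Int) (lon : Int) (out : Int × Int) : Decidable (Spec_time_zone gmt lon out) := by unfold Spec_time_zone; infer_instance

-- ===== CLAIM (what is proved, stated in full; the proofs are below) =====
def Claim_equal_time_zone : Prop := ∀ (gmt : Int) (lon : Int), Dom_time_zone gmt lon → Pre_time_zone gmt lon → Spec_time_zone gmt lon (time_zone gmt lon)

-- ===== LEMMAS AND PROOFS =====

-- q = floor((2*deg+375)/30); once all tests j ≤ i have failed (i ≤ q) and q ≤ 24,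
-- the loop returns at j = q+1.
theorem tzLoop_eq (deg : Int) (q : Int) (hq : q = PySem.Int.floordiv (2 * deg + 375) 30) :
    ∀ (fuel : Nat) (i : Int), i = 25 - (fuel : Int) → i ≤ q → q ≤ 24 →
      tzLoop deg fuel i = some (if q + 1 == 25 then 1 else q + 1) := by
  have hb : (30 : Int) * q ≤ 2 * deg + 375 ∧ 2 * deg + 375 < 30 * (q + 1) := by
    have h2 := (PySem.Int.floordiv_eq_iff_of_pos (a := 2 * deg + 375) (b := 30) (q := q)
      (by norm_num)).1 hq.symm
    constructor <;> nlinarith [h2.1, h2.2]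
  intro fuel
  induction fuel with
  | zero => intro i hi hle hq24; omega
  | succ n ih =>
    intro i hi hle hq24
    unfold tzLoop
    by_cases hc : 2 * deg < 30 * (i + 1) - 375
    · have : q = i := by omega
      simp [hc, this]
    · have : ¬ (i ≥ q) := by
        intro h
        exact hc (by omega)
      simp only [hc, if_false]
      exact ih (i + 1) (by push_cast at hi ⊢; omega) (by omega) hq24

theorem time_zone_spec : Claim_equal_time_zone := by
  intro gmt lon _ hpre
  have hpre' : lon ≤ 187 := hpre
  set q : Int := PySem.Int.floordiv (2 * lon + 375) 30 with hq
  have hb : (30 : Int) * q ≤ 2 * lon + 375 ∧ 2 * lon + 375 < 30 * (q + 1) := by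
    have h2 := (PySem.Int.floordiv_eq_iff_of_pos (a := 2 * lon + 375) (b := 30) (q := q)
      (by norm_num)).1 hq.symm
    constructor <;> nlinarith [h2.1, h2.2]
  have hq24 : q ≤ 24 := by omega
  have hloop : tzLoop lon 25 0 = some (if max 1 (q + 1) + 0 == 25 then 1 else max 1 (q + 1)) := by
    by_cases h0 : q ≤ 0
    · -- the very first test fires: zone = 1
      have hmax : max 1 (q + 1) = 1 := by omega
      unfold tzLoop
      simp only [hmax]
      split
      · rfl
      · omega
    · have hmax : max 1 (q + 1) = q + 1 := by omega
      rw [hmax]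
      have := tzLoop_eq lon q hq 25 0 (by norm_num) (by omega) hq24
      simpa using this
  have hloop' : tzLoop lon 25 0 = some (if max 1 (q + 1) == 25 then (1:Int) else max 1 (q + 1)) := by
    simpa using hloop
  have lhA : ∀ (zz : Int), (if zz < 13 then gmt + (zz - 13) else if zz == 13 then gmt else gmt + (zz - 13)) = gmt + zz - 13 := by
    intro zz
    split_ifs with h1 h2
    · ring
    · simp only [beq_iff_eq] at h2; omega
    · ring
  show (match tzLoop lon 25 0 with
        | none => ((0:Int), (0:Int))
        | some zone =>
          let lhour := if zone < 13 then gmt + (zone - 13) else if zone == 13 then gmt else gmt + (zone - 13)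
          let lhour := if lhour < 0 then lhour + 24 else lhour
          let lhour := if lhour ≥ 24 then lhour - 24 else lhour
          (zone, lhour))
      = time_zone_alt gmt lon
  rw [hloop']
  unfold time_zone_alt
  rw [← hq]
  show (let zone := if max 1 (q + 1) == 25 then (1:Int) else max 1 (q + 1)
        let lhour := if zone < 13 then gmt + (zone - 13) else if zone == 13 then gmt else gmt + (zone - 13)
        let lhour := if lhour < 0 then lhour + 24 else lhour
        let lhour := if lhour ≥ 24 then lhour - 24 else lhour
        (zone, lhour)) = _
  simp only [lhA]

-- ===== VERDICT (by name: the statement is the Claim_ definition above) =====
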